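-- pv_equiv track=rewrite | github.com/antilneeraj/GFG-POTD | POTD Solutions/14_06_2023_MaximumDiamonds.py | maxDiamonds
-- ===== SOURCE A (Python) =====
-- import heapq
--
-- def maxDiamonds(A, N, K):
--     heap = []
--     for num in A:
--         heapq.heappush(heap, -num)
--
--     arr = []
--     while K != 0:
--         max_num = -heapq.heappop(heap)
--         arr.append(max_num)
--         max_num //= 2
--         heapq.heappush(heap, -max_num)
--         K -= 1
--
--     return sum(arr)
-- ===== SOURCE B (Python) =====
-- def maxDiamonds(A, N, K):
--     arr = list(A)
--     total = 0
--     for _ in range(K):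
--         mi = 0
--         for j in range(1, len(arr)):
--             if arr[j] > arr[mi]:
--                 mi = j
--         total += arr[mi]
--         arr[mi] = arr[mi] // 2
--     return total
-- ===== Notes on version B (the rewrite author's own statement) =====
-- stated objective: simpler
-- what changed: Replaces the heapq priority queue and the collected list of picks by K linear max-scans over a plain list copy with a running total.
import Mathlib
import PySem

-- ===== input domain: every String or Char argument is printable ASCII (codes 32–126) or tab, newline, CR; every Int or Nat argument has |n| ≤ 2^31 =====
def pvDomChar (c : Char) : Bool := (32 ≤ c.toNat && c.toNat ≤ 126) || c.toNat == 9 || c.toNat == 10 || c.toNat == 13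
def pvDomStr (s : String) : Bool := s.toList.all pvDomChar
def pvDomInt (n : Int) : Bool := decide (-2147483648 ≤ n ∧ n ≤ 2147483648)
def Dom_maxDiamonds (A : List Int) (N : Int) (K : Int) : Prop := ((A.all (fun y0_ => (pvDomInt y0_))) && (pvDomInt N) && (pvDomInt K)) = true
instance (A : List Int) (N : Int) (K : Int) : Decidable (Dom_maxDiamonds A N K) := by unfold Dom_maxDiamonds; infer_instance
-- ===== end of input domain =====

-- B replaces A's heapq priority queue by K linear max-scans over a plain list copy
-- with a running total (objective: simpler; return value only — neither side mutates
-- its arguments).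

-- ===== PORT A =====
-- transliteration of CPython's heapq._siftdown loop (the hole walks toward the root)
def sdLoop (heap : List Int) (newitem : Int) (startpos pos : Nat) : List Int :=
  if _h : startpos < pos then
    let parentpos := (pos - 1) / 2
    let parent := heap.getD parentpos 0
    if newitem < parent then
      sdLoop (heap.set pos parent) newitem startpos parentpos
    else
      heap.set pos newitem
  else
    heap.set pos newitem
termination_by pos
decreasing_by omega

-- heapq._siftdown(heap, startpos, pos): newitem := heap[pos], then the loop above
def siftdown (heap : List Int) (startpos pos : Nat) : List Int :=
  sdLoop heap (heap.getD pos 0) startpos pos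

-- heapq.heappush
def heappush (heap : List Int) (item : Int) : List Int :=
  siftdown (heap ++ [item]) 0 heap.length

-- transliteration of CPython's heapq._siftup loop (the hole walks down to the smaller child)
def suLoop (heap : List Int) (newitem : Int) (pos : Nat) : List Int × Nat :=
  if _h : 2 * pos + 1 < heap.length then
    let childpos :=
      if 2 * pos + 2 < heap.length ∧ ¬ (heap.getD (2 * pos + 1) 0 < heap.getD (2 * pos + 2) 0)
      then 2 * pos + 2 else 2 * pos + 1
    suLoop (heap.set pos (heap.getD childpos 0)) newitem childpos
  else
    (heap.set pos newitem, pos)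
termination_by heap.length - pos
decreasing_by simp only [List.length_set]; split <;> omega

-- heapq._siftup: sift the hole down to a leaf, then _siftdown back up from there
def siftup (heap : List Int) (pos : Nat) : List Int :=
  siftdown (suLoop heap (heap.getD pos 0) pos).1 pos (suLoop heap (heap.getD pos 0) pos).2

-- heapq.heappop; on an empty heap Python raises IndexError (excluded by Pre_), so the
-- (0, []) branch is unreachable under Pre_
def heappop (heap : List Int) : Int × List Int :=
  match heap.getLast? with
  | none => (0, [])
  | some lastelt =>
    let rest := heap.dropLast
    if rest.isEmpty then (lastelt, rest)
    else (rest.getD 0 0, siftup (rest.set 0 lastelt) 0)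

-- the 'while K != 0' loop; under Pre_ (0 ≤ K) it runs exactly K.toNat times.
-- Python's arr.append(max_num) is ported as the standard cons accumulator; arr is
-- reversed before the final sum
def mdLoop : List Int → List Int → Nat → List Int
  | _, arr, 0 => arr
  | heap, arr, Nat.succ k =>
    let p := heappop heap
    let maxNum := -p.1
    mdLoop (heappush p.2 (-(PySem.Int.floordiv maxNum 2))) (maxNum :: arr) k

def maxDiamonds (A : List Int) (N : Int) (K : Int) : Int :=
  let heap := A.foldl (fun h num => heappush h (-num)) []
  (mdLoop heap [] K.toNat).reverse.foldl (· + ·) 0  -- sum(arr)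

-- ===== PORT B =====
-- the inner scan: for j in range(1, len(arr)): if arr[j] > arr[mi]: mi = j
def altScan (arr : List Int) : Nat :=
  (List.range' 1 (arr.length - 1)).foldl
    (fun mi j => if arr.getD mi 0 < arr.getD j 0 then j else mi) 0

def altLoop : List Int → Int → Nat → Int
  | _, total, 0 => total
  | arr, total, Nat.succ k =>
    let mi := altScan arr
    let v := arr.getD mi 0
    altLoop (arr.set mi (PySem.Int.floordiv v 2)) (total + v) k

def maxDiamonds_alt (A : List Int) (N : Int) (K : Int) : Int :=
  altLoop A 0 K.toNat

-- ===== PRECONDITION & SPEC =====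
-- Pre_ excludes exactly the inputs on which A does not return: K < 0 (the
-- 'while K != 0' loop never terminates) and A = [] with K > 0 (heappop on the
-- empty heap raises IndexError; B's arr[0] raises there too).
def Pre_maxDiamonds (A : List Int) (N : Int) (K : Int) : Prop :=
  0 ≤ K ∧ (K = 0 ∨ A ≠ [])
instance (A : List Int) (N : Int) (K : Int) : Decidable (Pre_maxDiamonds A N K) := by
  unfold Pre_maxDiamonds; infer_instance

def pvWitness_maxDiamonds : List Int × Int × Int := ([5, 3, 8], 3, 4)

def Spec_maxDiamonds (A : List Int) (N : Int) (K : Int) (out : Int) : Prop := out = maxDiamonds_alt A N K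
instance (A : List Int) (N : Int) (K : Int) (out : Int) : Decidable (Spec_maxDiamonds A N K out) := by unfold Spec_maxDiamonds; infer_instance

-- ===== CLAIM (what is proved, stated in full; the proofs are below) =====
def Claim_equal_maxDiamonds : Prop := ∀ (A : List Int) (N : Int) (K : Int), Dom_maxDiamonds A N K → Pre_maxDiamonds A N K → Spec_maxDiamonds A N K (maxDiamonds A N K)

-- ===== LEMMAS AND PROOFS =====

def IsHeap (h : List Int) : Prop :=
  ∀ j, 0 < j → j < h.length → h.getD ((j - 1) / 2) 0 ≤ h.getD j 0

theorem pv_getD_set (l : List Int) (i j : Nat) (v : Int) :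
    (l.set i v).getD j 0 = if i = j ∧ i < l.length then v else l.getD j 0 := by
  simp only [List.getD_eq_getElem?_getD, List.getElem?_set]
  split_ifs with h1 h2 h3 h4 <;> simp_all; omega

theorem pv_perm_set_cons_eraseIdx (l : List Int) (i : Nat) (x : Int) (hi : i < l.length) :
    (l.set i x).Perm (x :: l.eraseIdx i) := by
  rw [List.set_eq_take_append_cons_drop, if_pos hi, List.eraseIdx_eq_take_drop_succ]
  exact List.perm_middle

theorem pv_set_getD_self (l : List Int) (i : Nat) (hi : i < l.length) :
    l.set i (l.getD i 0) = l := by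
  apply List.ext_getElem
  · simp
  intro j hj hj'
  rw [List.getElem_set]
  split
  · next h => subst h; simp [List.getD_eq_getElem?_getD, List.getElem?_eq_getElem hi]
  · rfl

theorem pv_count_set (l : List Int) (i : Nat) (v a : Int) (hi : i < l.length) :
    (l.set i v).count a + (if l.getD i 0 = a then 1 else 0)
      = l.count a + (if v = a then 1 else 0) := by
  have h1 := (pv_perm_set_cons_eraseIdx l i v hi).count_eq a
  have h2 := (pv_perm_set_cons_eraseIdx l i (l.getD i 0) hi).count_eq a
  rw [pv_set_getD_self l i hi] at h2
  simp only [List.count_cons, beq_iff_eq] at h1 h2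
  split_ifs at h1 h2 ⊢ <;> omega

theorem pv_perm_set_set (l : List Int) (i j : Nat) (x : Int)
    (hij : i ≠ j) (hi : i < l.length) (hj : j < l.length) :
    ((l.set i (l.getD j 0)).set j x).Perm (l.set i x) := by
  rw [List.perm_iff_count]
  intro a
  have hj1 : j < (l.set i (l.getD j 0)).length := by simpa using hj
  have c1 := pv_count_set (l.set i (l.getD j 0)) j x a hj1
  have c2 := pv_count_set l i (l.getD j 0) a hi
  have c3 := pv_count_set l i x a hi
  have hgj : (l.set i (l.getD j 0)).getD j 0 = l.getD j 0 := by
    rw [pv_getD_set]; simp [hij]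
  rw [hgj] at c1
  split_ifs at c1 c2 c3 <;> omega

theorem sdLoop_perm (heap : List Int) (newitem : Int) (pos : Nat)
    (hp : pos < heap.length) :
    (sdLoop heap newitem 0 pos).Perm (heap.set pos newitem) := by
  induction pos using Nat.strong_induction_on generalizing heap with
  | _ pos ih =>
    rw [sdLoop]
    split
    · next h0 =>
      show (if newitem < heap.getD ((pos - 1) / 2) 0 then
              sdLoop (heap.set pos (heap.getD ((pos - 1) / 2) 0)) newitem 0 ((pos - 1) / 2)
            else heap.set pos newitem).Perm (heap.set pos newitem)
      split
      · next hlt =>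
        have hpp : (pos - 1) / 2 < pos := by omega
        have := ih _ hpp (heap.set pos (heap.getD ((pos - 1) / 2) 0)) (by simpa using by omega)
        exact this.trans (pv_perm_set_set heap pos ((pos - 1) / 2) newitem (by omega) hp (by omega))
      · exact List.Perm.refl _
    · exact List.Perm.refl _

theorem sdLoop_heap (heap : List Int) (newitem : Int) (pos : Nat)
    (hp : pos < heap.length)
    (ha : ∀ j, 0 < j → j < heap.length → j ≠ pos → (j - 1) / 2 ≠ pos →
      heap.getD ((j - 1) / 2) 0 ≤ heap.getD j 0)
    (hb : ∀ j, 0 < j → j < heap.length → (j - 1) / 2 = pos →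
      newitem ≤ heap.getD j 0 ∧ (0 < pos → heap.getD ((pos - 1) / 2) 0 ≤ heap.getD j 0)) :
    IsHeap (sdLoop heap newitem 0 pos) := by
  induction pos using Nat.strong_induction_on generalizing heap with
  | _ pos ih =>
    rw [sdLoop]
    split
    · next h0 =>
      show IsHeap (if newitem < heap.getD ((pos - 1) / 2) 0 then
              sdLoop (heap.set pos (heap.getD ((pos - 1) / 2) 0)) newitem 0 ((pos - 1) / 2)
            else heap.set pos newitem)
      split
      · next hlt =>
        -- recurse: hole moves to parentpos
        set pp := (pos - 1) / 2 with hppdef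
        apply ih pp (by omega) _ (by simpa using by omega)
        · -- ha'
          intro j hj hjlen hjne hjpar
          simp only [List.length_set] at hjlen
          rw [pv_getD_set, pv_getD_set]
          have hjpos : j ≠ pos := by omega
          split_ifs with h1 h2
          · omega
          · -- (j-1)/2 = pos : j is a child of the old hole
            exact (hb j hj hjlen (by omega)).2 h0
          · omega
          · exact ha j hj hjlen hjpos (by omega)
        · -- hb'
          intro j hj hjlen hjparent
          simp only [List.length_set] at hjlen
          have hppj : pp < pos := by omega
          have hjgt : pp < j := by omega
          constructor
          · rw [pv_getD_set]
            split_ifs with h1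
            · -- j = pos: holds the parent value
              exact le_of_lt hlt
            · -- sibling: newitem < parent = heap[pp] ≤ heap[j]
              have := ha j hj hjlen (by omega) (by omega)
              rw [hjparent] at this
              exact le_of_lt (lt_of_lt_of_le hlt this)
          · intro hpp0
            rw [pv_getD_set, pv_getD_set]
            have hC1 : ¬(pos = (pp - 1) / 2 ∧ pos < heap.length) := by omega
            rw [if_neg hC1]
            by_cases hC2 : pos = j ∧ pos < heap.length
            · rw [if_pos hC2]
              exact ha pp hpp0 (by omega) (by omega) (by omega)
            · rw [if_neg hC2]
              have hjpos : j ≠ pos := fun h => hC2 ⟨h.symm, by omega⟩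
              have t1 := ha pp hpp0 (by omega) (by omega) (by omega)
              have t2 := ha j hj hjlen hjpos (by omega)
              rw [hjparent] at t2
              exact le_trans t1 t2
      · next hge =>
        -- stop: place newitem at pos
        rw [not_lt] at hge
        intro j hj hjlen
        simp only [List.length_set] at hjlen
        rw [pv_getD_set, pv_getD_set]
        by_cases hC1 : pos = (j - 1) / 2 ∧ pos < heap.length
        · rw [if_pos hC1]
          have hC2 : ¬(pos = j ∧ pos < heap.length) := by omega
          rw [if_neg hC2]
          exact (hb j hj hjlen (by omega)).1
        · rw [if_neg hC1]
          by_cases hC2 : pos = j ∧ pos < heap.length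
          · rw [if_pos hC2]
            obtain ⟨rfl, -⟩ := hC2
            exact hge
          · rw [if_neg hC2]
            have hjpos : j ≠ pos := fun h => hC2 ⟨h.symm, by omega⟩
            exact ha j hj hjlen hjpos (by omega)
    · next h0 =>
      -- pos = 0
      have hpos0 : pos = 0 := by omega
      subst hpos0
      intro j hj hjlen
      simp only [List.length_set] at hjlen
      rw [pv_getD_set, pv_getD_set]
      split_ifs with h1 h2
      · omega
      · exact (hb j hj hjlen (by omega)).1
      · omega
      · exact ha j hj hjlen (by omega) (by omega)

theorem suLoop_step (heap : List Int) (newitem : Int) (pos : Nat)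
    (h : 2 * pos + 1 < heap.length) :
    suLoop heap newitem pos =
      suLoop (heap.set pos (heap.getD (if 2 * pos + 2 < heap.length ∧ ¬ (heap.getD (2 * pos + 1) 0 < heap.getD (2 * pos + 2) 0) then 2 * pos + 2 else 2 * pos + 1) 0)) newitem
        (if 2 * pos + 2 < heap.length ∧ ¬ (heap.getD (2 * pos + 1) 0 < heap.getD (2 * pos + 2) 0) then 2 * pos + 2 else 2 * pos + 1) := by
  rw [suLoop, dif_pos h]

theorem suLoop_base (heap : List Int) (newitem : Int) (pos : Nat)
    (h : ¬ 2 * pos + 1 < heap.length) :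
    suLoop heap newitem pos = (heap.set pos newitem, pos) := by
  rw [suLoop, dif_neg h]

theorem suLoop_spec (heap : List Int) (newitem : Int) (pos : Nat)
    (hp : pos < heap.length) :
    (suLoop heap newitem pos).2 < heap.length ∧
    (suLoop heap newitem pos).1.length = heap.length ∧
    (suLoop heap newitem pos).1.Perm (heap.set pos newitem) ∧
    (suLoop heap newitem pos).1.getD (suLoop heap newitem pos).2 0 = newitem := by
  generalize hfuel : heap.length - pos = fuel
  induction fuel using Nat.strong_induction_on generalizing heap pos with
  | _ fuel ih =>
    by_cases hc : 2 * pos + 1 < heap.length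
    · rw [suLoop_step heap newitem pos hc]
      set c := if 2 * pos + 2 < heap.length ∧ ¬ (heap.getD (2 * pos + 1) 0 < heap.getD (2 * pos + 2) 0) then 2 * pos + 2 else 2 * pos + 1 with hcdef
      have hclt : c < heap.length := by rw [hcdef]; split <;> omega
      have hcpos : pos < c := by rw [hcdef]; split <;> omega
      set h' := heap.set pos (heap.getD c 0) with h'def
      have hlen' : h'.length = heap.length := by simp [h'def]
      have := ih (h'.length - c) (by omega) h' c (by omega) rfl
      obtain ⟨t1, t2, t3, t4⟩ := this
      refine ⟨by omega, by omega, ?_, t4⟩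
      refine t3.trans ?_
      rw [h'def]
      exact pv_perm_set_set heap pos c newitem (by omega) hp hclt
    · rw [suLoop_base heap newitem pos hc]
      refine ⟨hp, by simp, List.Perm.refl _, ?_⟩
      rw [pv_getD_set]; simp [hp]

theorem suLoop_heap (heap : List Int) (newitem : Int) (pos : Nat)
    (hp : pos < heap.length)
    (ha : ∀ j, 0 < j → j < heap.length → j ≠ pos → (j - 1) / 2 ≠ pos →
      heap.getD ((j - 1) / 2) 0 ≤ heap.getD j 0)
    (hb : 0 < pos → ∀ j, 0 < j → j < heap.length → (j - 1) / 2 = pos →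
      heap.getD ((pos - 1) / 2) 0 ≤ heap.getD j 0) :
    (∀ j, 0 < j → j < (suLoop heap newitem pos).1.length → j ≠ (suLoop heap newitem pos).2 →
       (j - 1) / 2 ≠ (suLoop heap newitem pos).2 →
       (suLoop heap newitem pos).1.getD ((j - 1) / 2) 0 ≤ (suLoop heap newitem pos).1.getD j 0) ∧
    2 * (suLoop heap newitem pos).2 + 1 ≥ heap.length := by
  generalize hfuel : heap.length - pos = fuel
  induction fuel using Nat.strong_induction_on generalizing heap pos with
  | _ fuel ih =>
    by_cases hc : 2 * pos + 1 < heap.length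
    · rw [suLoop_step heap newitem pos hc]
      set c := if 2 * pos + 2 < heap.length ∧ ¬ (heap.getD (2 * pos + 1) 0 < heap.getD (2 * pos + 2) 0) then 2 * pos + 2 else 2 * pos + 1 with hcdef
      have hclt : c < heap.length := by rw [hcdef]; split <;> omega
      have hcpos : pos < c := by rw [hcdef]; split <;> omega
      have hcchild : (c - 1) / 2 = pos := by rw [hcdef]; split <;> omega
      set h' := heap.set pos (heap.getD c 0) with h'def
      have hlen' : h'.length = heap.length := by simp [h'def]
      have hgetD : ∀ i, i ≠ pos → h'.getD i 0 = heap.getD i 0 := by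
        intro i hi; rw [h'def, pv_getD_set, if_neg]
        intro hcon; exact hi hcon.1.symm
      have hgetDpos : h'.getD pos 0 = heap.getD c 0 := by
        rw [h'def, pv_getD_set]; simp [hp]
      have hres := ih (h'.length - c) (by omega) h' c (by omega) ?_ ?_ rfl
      · rw [hlen'] at hres; exact hres
      · -- ha' for (h', c)
        intro j hj hjlen hjc hjparc
        rw [hlen'] at hjlen
        by_cases hjpos : j = pos
        · subst hjpos
          -- parent pair of pos: h'[(pos-1)/2] ≤ h'[pos] = heap[c]
          have hppne : (j - 1) / 2 ≠ j := by omega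
          rw [hgetD _ hppne, hgetDpos]
          exact hb hj c (by omega) hclt hcchild
        · by_cases hjpar : (j - 1) / 2 = pos
          · -- sibling of c
            rw [hjpar, hgetDpos, hgetD j hjpos]
            -- heap[c] ≤ heap[j] where j is the other child of pos
            rw [hcdef]
            by_cases hcond : 2 * pos + 2 < heap.length ∧ ¬ (heap.getD (2 * pos + 1) 0 < heap.getD (2 * pos + 2) 0)
            · rw [if_pos hcond]
              have hj1 : j = 2 * pos + 1 := by
                rw [hcdef] at hjc; rw [if_pos hcond] at hjc; omega
              rw [hj1]; exact le_of_not_gt hcond.2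
            · rw [if_neg hcond]
              have hj2 : j = 2 * pos + 2 := by
                rw [hcdef] at hjc; rw [if_neg hcond] at hjc; omega
              have h2lt : 2 * pos + 2 < heap.length := by omega
              have := not_and.mp hcond h2lt
              rw [not_not] at this
              rw [hj2]; exact le_of_lt this
          · -- pair untouched
            have hpne : (j - 1) / 2 ≠ pos := hjpar
            rw [hgetD _ hpne, hgetD j hjpos]
            exact ha j hj hjlen hjpos hpne
      · -- hb' for (h', c)
        intro _ j hj hjlen hjparc
        rw [hlen'] at hjlen
        rw [hcchild, hgetDpos, hgetD j (by omega)]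
        have := ha j hj hjlen (by omega) (by omega)
        rw [hjparc] at this
        exact this
    · rw [suLoop_base heap newitem pos hc]
      constructor
      · intro j hj hjlen hjne hjpar
        simp only [List.length_set] at hjlen
        rw [pv_getD_set, pv_getD_set]
        have hC1 : ¬(pos = (j - 1) / 2 ∧ pos < heap.length) := fun h => hjpar h.1.symm
        have hC2 : ¬(pos = j ∧ pos < heap.length) := fun h => hjne h.1.symm
        rw [if_neg hC1, if_neg hC2]
        exact ha j hj hjlen (fun h => hjne h) (fun h => hjpar h)
      · omega

theorem pv_getD_append (l : List Int) (x : Int) (i : Nat) (hi : i < l.length) :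
    (l ++ [x]).getD i 0 = l.getD i 0 := by
  simp [List.getD_eq_getElem?_getD, List.getElem?_append_left hi]

theorem pv_getD_last (l : List Int) (x : Int) :
    (l ++ [x]).getD l.length 0 = x := by
  simp [List.getD_eq_getElem?_getD]

theorem heappush_perm (heap : List Int) (x : Int) :
    (heappush heap x).Perm (x :: heap) := by
  unfold heappush siftdown
  rw [pv_getD_last]
  have h1 := sdLoop_perm (heap ++ [x]) x heap.length (by simp)
  have h2 : (heap ++ [x]).set heap.length x = heap ++ [x] := by
    have := pv_set_getD_self (heap ++ [x]) heap.length (by simp)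
    rwa [pv_getD_last] at this
  rw [h2] at h1
  exact h1.trans (List.perm_append_singleton x heap)

theorem heappush_heap (heap : List Int) (x : Int) (hh : IsHeap heap) :
    IsHeap (heappush heap x) := by
  unfold heappush siftdown
  rw [pv_getD_last]
  apply sdLoop_heap _ _ _ (by simp)
  · intro j hj hjlen hjne _
    simp only [List.length_append, List.length_cons, List.length_nil] at hjlen
    have hjl : j < heap.length := by omega
    rw [pv_getD_append _ _ _ hjl, pv_getD_append _ _ _ (by omega)]
    exact hh j hj hjl
  · intro j hj hjlen hjpar
    simp only [List.length_append, List.length_cons, List.length_nil] at hjlen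
    omega

theorem root_min (heap : List Int) (hh : IsHeap heap) :
    ∀ j, j < heap.length → heap.getD 0 0 ≤ heap.getD j 0 := by
  intro j
  induction j using Nat.strong_induction_on with
  | _ j ih =>
    intro hj
    rcases Nat.eq_zero_or_pos j with rfl | hj0
    · exact le_refl _
    · exact le_trans (ih ((j - 1) / 2) (by omega) (by omega)) (hh j hj0 hj)

theorem pv_getD_dropLast (l : List Int) (i : Nat) (hi : i < l.length - 1) :
    l.dropLast.getD i 0 = l.getD i 0 := by
  have hil : i < l.length := by omega
  simp [List.getD_eq_getElem?_getD, hi, List.getElem?_eq_getElem hil]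

theorem pv_cons_getD_eraseIdx (l : List Int) (h : 0 < l.length) :
    l.getD 0 0 :: l.eraseIdx 0 = l := by
  cases l with
  | nil => simp at h
  | cons a t => rfl

theorem heappop_spec (heap : List Int) (hne : heap ≠ []) (hh : IsHeap heap) :
    (heappop heap).1 = heap.getD 0 0 ∧
    ((heappop heap).1 :: (heappop heap).2).Perm heap ∧
    IsHeap (heappop heap).2 := by
  unfold heappop
  have hlast : heap.getLast? = some (heap.getLast hne) := List.getLast?_eq_some_getLast hne
  rw [hlast]
  dsimp only
  set last := heap.getLast hne with hlastdef
  set rest := heap.dropLast with hrestdef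
  have hsplit : rest ++ [last] = heap := by
    rw [hrestdef, hlastdef]; exact List.dropLast_append_getLast hne
  have hlen : rest.length = heap.length - 1 := by simp [hrestdef]
  have hlenpos : 0 < heap.length := List.length_pos_of_ne_nil hne
  by_cases hre : rest.isEmpty
  · rw [if_pos hre]
    have hrnil : rest = [] := List.isEmpty_iff.mp hre
    have hsing : heap = [last] := by rw [← hsplit, hrnil]; rfl
    refine ⟨?_, ?_, ?_⟩
    · show last = heap.getD 0 0
      rw [hsing]; rfl
    · show (last :: rest).Perm heap
      rw [hrnil, hsing]
    · show IsHeap rest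
      intro j hj hjlen
      rw [hrnil] at hjlen
      simp at hjlen
  · rw [if_neg hre]
    have hrpos : 0 < rest.length :=
      List.length_pos_of_ne_nil (by simpa [List.isEmpty_iff] using hre)
    set X := rest.set 0 last with hXdef
    have hXlen : X.length = rest.length := by simp [hXdef]
    have hX0 : X.getD 0 0 = last := by rw [hXdef, pv_getD_set]; simp [hrpos]
    -- siftup X 0
    unfold siftup
    rw [hX0]
    obtain ⟨s1, s2, s3, s4⟩ := suLoop_spec X last 0 (by omega)
    obtain ⟨u1, u2⟩ := suLoop_heap X last 0 (by omega)
      (by intro j hj hjlen hjne hjpar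
          rw [hXlen] at hjlen
          have hg : ∀ i, 0 < i → i < rest.length → X.getD i 0 = heap.getD i 0 := by
            intro i hi hilen
            rw [hXdef, pv_getD_set, if_neg (by omega), hrestdef, pv_getD_dropLast _ _ (by omega)]
          rw [hg _ (by omega) (by omega), hg _ hj hjlen]
          exact hh j hj (by omega))
      (by omega)
    unfold siftdown
    rw [s4]
    set r := suLoop X last 0 with hrdef
    -- value
    refine ⟨?_, ?_, ?_⟩
    · show rest.getD 0 0 = heap.getD 0 0
      rw [hrestdef, pv_getD_dropLast _ _ (by omega)]
    · -- permutation
      have p1 := sdLoop_perm r.1 last r.2 (by omega)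
      have p2 : r.1.set r.2 last = r.1 := by
        have := pv_set_getD_self r.1 r.2 (by omega)
        rwa [s4] at this
      rw [p2] at p1
      have p3 : (X.set 0 last) = X := by rw [hXdef, List.set_set]
      rw [p3] at s3
      have p4 : X.Perm (last :: rest.eraseIdx 0) := pv_perm_set_cons_eraseIdx rest 0 last hrpos
      have hrest_cons : rest.getD 0 0 :: rest.eraseIdx 0 = rest :=
        pv_cons_getD_eraseIdx rest hrpos
      refine List.Perm.trans ((p1.trans (s3.trans p4)).cons (rest.getD 0 0)) ?_
      refine List.Perm.trans (List.Perm.swap last (rest.getD 0 0) (rest.eraseIdx 0)) ?_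
      rw [hrest_cons, ← hsplit]
      exact (List.perm_append_singleton _ _).symm
    · -- heap property
      apply sdLoop_heap r.1 last r.2 (by omega)
      · intro j hj hjlen hjne hjpar
        exact u1 j hj hjlen hjne hjpar
      · intro j hj hjlen hjpar
        rw [s2, hXlen] at hjlen
        omega

theorem altScan_aux (arr : List Int) (n : Nat) :
    ∀ (s mi : Nat), mi < arr.length → s + n = arr.length →
    ((List.range' s n).foldl (fun mi j => if arr.getD mi 0 < arr.getD j 0 then j else mi) mi) < arr.length ∧
    arr.getD mi 0 ≤ arr.getD ((List.range' s n).foldl (fun mi j => if arr.getD mi 0 < arr.getD j 0 then j else mi) mi) 0 ∧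
    (∀ j, s ≤ j → j < arr.length →
      arr.getD j 0 ≤ arr.getD ((List.range' s n).foldl (fun mi j => if arr.getD mi 0 < arr.getD j 0 then j else mi) mi) 0) := by
  induction n with
  | zero =>
    intro s mi hmi hs
    refine ⟨by simpa using hmi, by simp, ?_⟩
    intro j hj hjl; omega
  | succ n ihn =>
    intro s mi hmi hs
    rw [List.range'_succ, List.foldl_cons]
    set mi' := if arr.getD mi 0 < arr.getD s 0 then s else mi with hmi'def
    have hmi'lt : mi' < arr.length := by rw [hmi'def]; split <;> omega
    obtain ⟨t1, t2, t3⟩ := ihn (s + 1) mi' hmi'lt (by omega)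
    refine ⟨t1, ?_, ?_⟩
    · refine le_trans ?_ t2
      rw [hmi'def]; split
      · next h => exact le_of_lt h
      · exact le_refl _
    · intro j hj hjl
      rcases Nat.eq_or_lt_of_le hj with rfl | hjgt
      · refine le_trans ?_ t2
        rw [hmi'def]; split
        · exact le_refl _
        · next h => exact le_of_not_gt (by simpa using h)
      · exact t3 j (by omega) hjl

theorem altScan_spec (arr : List Int) (hne : arr ≠ []) :
    altScan arr < arr.length ∧
    ∀ j, j < arr.length → arr.getD j 0 ≤ arr.getD (altScan arr) 0 := by
  have hlen : 0 < arr.length := List.length_pos_of_ne_nil hne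
  obtain ⟨t1, t2, t3⟩ := altScan_aux arr (arr.length - 1) 1 0 hlen (by omega)
  refine ⟨t1, ?_⟩
  intro j hj
  rcases Nat.eq_zero_or_pos j with rfl | hj0
  · exact t2
  · exact t3 j hj0 hj

theorem altLoop_shift (arr : List Int) (t : Int) (k : Nat) :
    altLoop arr t k = t + altLoop arr 0 k := by
  induction k generalizing arr t with
  | zero => simp [altLoop]
  | succ k ih =>
    show altLoop (arr.set _ _) (t + _) k = t + altLoop (arr.set _ _) (0 + _) k
    rw [ih, ih (arr.set _ _) (0 + _)]
    ring

theorem pv_getD_mem (l : List Int) (j : Nat) (hj : j < l.length) :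
    l.getD j 0 ∈ l := by
  rw [List.getD_eq_getElem?_getD, List.getElem?_eq_getElem hj]
  exact List.getElem_mem hj

theorem pv_mem_getD (l : List Int) (a : Int) (ha : a ∈ l) :
    ∃ j, j < l.length ∧ l.getD j 0 = a := by
  obtain ⟨j, hj, hja⟩ := List.mem_iff_getElem.mp ha
  exact ⟨j, hj, by rw [List.getD_eq_getElem?_getD, List.getElem?_eq_getElem hj]; exact hja⟩

theorem mdLoop_sum (k : Nat) (heap arr pre : List Int)
    (hh : IsHeap heap) (hperm : (heap.map (fun x => -x)).Perm arr)
    (hne : k = 0 ∨ arr ≠ []) :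
    (mdLoop heap pre k).sum = pre.sum + altLoop arr 0 k := by
  induction k generalizing heap arr pre with
  | zero => simp [mdLoop, altLoop]
  | succ k ih =>
    have harrne : arr ≠ [] := hne.resolve_left (by omega)
    have harrlen : 0 < arr.length := List.length_pos_of_ne_nil harrne
    have hheaplen : heap.length = arr.length := by simpa using hperm.length_eq
    have hheapne : heap ≠ [] := by
      intro h; rw [h] at hheaplen; simp at hheaplen; omega
    obtain ⟨hm, hpermpop, hh'⟩ := heappop_spec heap hheapne hh
    obtain ⟨hmi, hmax⟩ := altScan_spec arr harrne
    have hvm : arr.getD (altScan arr) 0 = -(heappop heap).1 := by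
      have hmmem : -(heappop heap).1 ∈ arr := by
        refine hperm.mem_iff.mp ?_
        rw [hm]
        exact List.mem_map_of_mem (pv_getD_mem heap 0 (by omega))
      have hmub : ∀ z ∈ arr, z ≤ -(heappop heap).1 := by
        intro z hz
        obtain ⟨y, hy, rfl⟩ := List.mem_map.mp (hperm.mem_iff.mpr hz)
        obtain ⟨j, hjl, hjy⟩ := pv_mem_getD heap y hy
        have := root_min heap hh j hjl
        rw [hjy, ← hm] at this
        omega
      have h1 := hmub _ (pv_getD_mem arr (altScan arr) hmi)
      obtain ⟨j, hjl, hjy⟩ := pv_mem_getD arr (-(heappop heap).1) hmmem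
      have h2 := hmax j hjl
      rw [hjy] at h2
      omega
    have hpermnext :
        ((heappush (heappop heap).2 (-(PySem.Int.floordiv (-(heappop heap).1) 2))).map (fun x => -x)).Perm
          (arr.set (altScan arr) (PySem.Int.floordiv (arr.getD (altScan arr) 0) 2)) := by
      have w1 := (heappush_perm (heappop heap).2 (-(PySem.Int.floordiv (-(heappop heap).1) 2))).map (fun x : Int => -x)
      have w3 : (((heappop heap).1 :: (heappop heap).2).map (fun x : Int => -x)).Perm arr :=
        (hpermpop.map _).trans hperm
      simp only [List.map_cons] at w1 w3
      have w4 : arr.Perm (arr.getD (altScan arr) 0 :: arr.eraseIdx (altScan arr)) := by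
        have := pv_perm_set_cons_eraseIdx arr (altScan arr) (arr.getD (altScan arr) 0) hmi
        rwa [pv_set_getD_self arr (altScan arr) hmi] at this
      have w5 : ((heappop heap).2.map (fun x : Int => -x)).Perm (arr.eraseIdx (altScan arr)) := by
        have := w3.trans w4
        rw [hvm] at this
        exact this.cons_inv
      refine w1.trans ?_
      refine List.Perm.trans ?_ (pv_perm_set_cons_eraseIdx arr (altScan arr) _ hmi).symm
      have hneg : -(-(PySem.Int.floordiv (-(heappop heap).1) 2)) = PySem.Int.floordiv (arr.getD (altScan arr) 0) 2 := by
        rw [hvm]; ring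
      rw [hneg]
      exact w5.cons _
    have hnextne : arr.set (altScan arr) (PySem.Int.floordiv (arr.getD (altScan arr) 0) 2) ≠ [] := by
      intro h
      have hl := congrArg List.length h
      simp only [List.length_set, List.length_nil] at hl
      omega
    have hhnext : IsHeap (heappush (heappop heap).2 (-(PySem.Int.floordiv (-(heappop heap).1) 2))) :=
      heappush_heap _ _ hh'
    show (mdLoop (heappush (heappop heap).2 (-(PySem.Int.floordiv (-(heappop heap).1) 2)))
            (-(heappop heap).1 :: pre) k).sum = pre.sum + altLoop arr 0 (k + 1)
    rw [ih _ _ _ hhnext hpermnext (Or.inr hnextne)]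
    have hstep : altLoop arr 0 (k + 1)
        = altLoop (arr.set (altScan arr) (PySem.Int.floordiv (arr.getD (altScan arr) 0) 2))
            (0 + arr.getD (altScan arr) 0) k := rfl
    rw [hstep, List.sum_cons, hvm]
    rw [show ((0:Int) + -(heappop heap).1) = -(heappop heap).1 from by ring]
    rw [altLoop_shift _ (-(heappop heap).1) k]
    ring

theorem build_heap (A : List Int) (h0 : List Int) (hh : IsHeap h0) :
    IsHeap (A.foldl (fun h num => heappush h (-num)) h0) ∧
    ((A.foldl (fun h num => heappush h (-num)) h0).map (fun x => -x)).Perm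
      (A ++ h0.map (fun x => -x)) := by
  induction A generalizing h0 with
  | nil => exact ⟨hh, List.Perm.refl _⟩
  | cons a t ih =>
    rw [List.foldl_cons]
    obtain ⟨t1, t2⟩ := ih (heappush h0 (-a)) (heappush_heap h0 (-a) hh)
    refine ⟨t1, ?_⟩
    refine t2.trans ?_
    have hp : ((heappush h0 (-a)).map (fun x : Int => -x)).Perm (a :: h0.map (fun x => -x)) := by
      have := (heappush_perm h0 (-a)).map (fun x : Int => -x)
      simpa using this
    refine List.Perm.trans (List.Perm.append_left t hp) ?_
    show (t ++ a :: h0.map (fun x => -x)).Perm ((a :: t) ++ h0.map (fun x => -x))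
    exact List.perm_middle

-- ===== VERDICT (by name: the statement is the Claim_ definition above) =====
theorem maxDiamonds_spec : Claim_equal_maxDiamonds := by
  intro A N K _ hpre
  unfold Spec_maxDiamonds maxDiamonds maxDiamonds_alt
  rw [← List.sum_eq_foldl, List.sum_reverse]
  obtain ⟨hK, hA⟩ := hpre
  obtain ⟨hh, hperm⟩ := build_heap A [] (by intro j hj hj'; simp at hj')
  simp only [List.map_nil, List.append_nil] at hperm
  have := mdLoop_sum K.toNat _ A [] hh hperm
    (hA.imp (fun h => by omega) id)
  simpa using this
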